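-- pv_equiv track=rewrite | github.com/mToki/hackathon7-japan | tree2.py | get_vdisk_list
-- ===== SOURCE A (Python) =====
-- def get_vdisk_list(text):
--   lines = text.splitlines()
--   lines = list(map(lambda x: x.strip(), lines))
--   vdisk_list = []
--   d = {}
--   for line in lines:
--     if line == '':
--       if d != {}:
--         vdisk_list.append(d)
--       d = {}
--       continue
--     words = line.split(': ')
--     if len(words) != 2:
--       continue
--     words[1] = words[1].replace('"', '')
--     d[words[0]] = words[1]
--   if d != {}:
--     vdisk_list.append(d)
--   return vdisk_list
-- ===== SOURCE B (Python) =====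
-- def split_blocks(lines):
--     # recursively cut the line list at blank lines
--     if '' in lines:
--         i = lines.index('')
--         return [lines[:i]] + split_blocks(lines[i + 1:])
--     return [lines]
--
-- def parse_block(block):
--     pairs = (line.split(': ') for line in block)
--     return {p[0]: p[1].replace('"', '') for p in pairs if len(p) == 2}
--
-- def get_vdisk_list(text):
--     lines = [l.strip() for l in text.splitlines()]
--     return [d for d in map(parse_block, split_blocks(lines)) if d]
-- ===== Notes on version B (the rewrite author's own statement) =====
-- stated objective: alternative
-- what changed: Replaces A's single stateful accumulate-and-flush loop by a two-phase decomposition: first split the stripped line list into blocks at blank lines (recursively via index/slice), then parse each block independently into a dict and keep the non-empty ones.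
import Mathlib
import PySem

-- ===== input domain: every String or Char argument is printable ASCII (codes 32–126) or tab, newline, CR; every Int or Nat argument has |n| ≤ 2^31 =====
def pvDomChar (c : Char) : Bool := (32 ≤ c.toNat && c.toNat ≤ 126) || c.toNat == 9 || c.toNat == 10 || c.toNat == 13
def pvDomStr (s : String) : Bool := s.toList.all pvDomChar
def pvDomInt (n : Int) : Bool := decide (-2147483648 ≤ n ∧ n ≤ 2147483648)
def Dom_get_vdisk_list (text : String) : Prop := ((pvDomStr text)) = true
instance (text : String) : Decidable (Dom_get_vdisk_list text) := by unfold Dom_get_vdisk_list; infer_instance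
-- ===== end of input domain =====

-- B replaces A's stateful accumulate-and-flush loop by a two-phase pass (split the
-- stripped lines into blocks at blank lines, then parse each block into a dict);
-- objective: alternative decomposition, same cost.

-- ===== PORT A =====
def get_vdisk_list (text : String) : List (List (String × String)) :=
  let lines := (PySem.Str.splitlines text).map (fun x => PySem.Str.strip x)
  let res := lines.foldl (fun (st : List (PySem.Dict String String) × PySem.Dict String String) line =>
    if line = "" then
      (if st.2.items ≠ [] then st.1 ++ [st.2] else st.1, PySem.Dict.empty)
    else
      -- words = line.split(': '); if len(words) != 2: continue; else insert
      match PySem.Str.split? line ": " with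
      | some [k, v] => (st.1, st.2.insert k (PySem.Str.replace v "\"" ""))
      | _ => st) ([], PySem.Dict.empty)
  (if res.2.items ≠ [] then res.1 ++ [res.2] else res.1).map (fun d => d.items)

-- ===== PORT B =====
-- split_blocks: recursively cut the line list at the first blank line
-- ('' in lines / lines.index('') ported as ∈ / idxOf: first occurrence, exact here)
def pvSplitBlocks (lines : List String) : List (List String) :=
  if h : "" ∈ lines then
    lines.take (lines.idxOf "") :: pvSplitBlocks (lines.drop (lines.idxOf "" + 1))
  else [lines]
termination_by lines.length
decreasing_by
  simp only [List.length_drop]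
  have := List.idxOf_lt_length_of_mem h
  omega

-- parse_block: dict comprehension over the split lines (overwrite = Dict.insert)
def pvParseBlock (block : List String) : PySem.Dict String String :=
  block.foldl (fun d line =>
    let p := (PySem.Str.split? line ": ").getD []
    if p.length = 2 then
      d.insert (p.headD "") (PySem.Str.replace (p.getD 1 "") "\"" "")
    else d) PySem.Dict.empty

def get_vdisk_list_alt (text : String) : List (List (String × String)) :=
  let lines := (PySem.Str.splitlines text).map (fun l => PySem.Str.strip l)
  ((((pvSplitBlocks lines).map pvParseBlock).filter (fun d => d.items ≠ [])).map (fun d => d.items))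

-- ===== PRECONDITION & SPEC =====
def Spec_get_vdisk_list (text : String) (out : List (List (String × String))) : Prop := out = get_vdisk_list_alt text
instance (text : String) (out : List (List (String × String))) : Decidable (Spec_get_vdisk_list text out) := by unfold Spec_get_vdisk_list; infer_instance

-- ===== CLAIM (what is proved, stated in full; the proofs are below) =====
def Claim_equal_get_vdisk_list : Prop := ∀ (text : String), Dom_get_vdisk_list text → Spec_get_vdisk_list text (get_vdisk_list text)

-- ===== LEMMAS AND PROOFS =====

-- A's loop step and finalization, named for the invariant proof
def pvStepA (st : List (PySem.Dict String String) × PySem.Dict String String) (line : String) :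
    List (PySem.Dict String String) × PySem.Dict String String :=
  if line = "" then
    (if st.2.items ≠ [] then st.1 ++ [st.2] else st.1, PySem.Dict.empty)
  else
    match PySem.Str.split? line ": " with
    | some [k, v] => (st.1, st.2.insert k (PySem.Str.replace v "\"" ""))
    | _ => st

def pvFin (st : List (PySem.Dict String String) × PySem.Dict String String) :
    List (PySem.Dict String String) :=
  if st.2.items ≠ [] then st.1 ++ [st.2] else st.1

-- inserting one line into an accumulating dict
def pvInsertLine (d : PySem.Dict String String) (line : String) : PySem.Dict String String :=
  match PySem.Str.split? line ": " with
  | some [k, v] => d.insert k (PySem.Str.replace v "\"" "")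
  | _ => d

def pvParseFrom (d : PySem.Dict String String) (block : List String) : PySem.Dict String String :=
  block.foldl pvInsertLine d

-- B's per-block result, with the current dict threaded into the first block
def pvG (d : PySem.Dict String String) (lines : List String) : List (PySem.Dict String String) :=
  match pvSplitBlocks lines with
  | [] => []
  | b :: bs => pvParseFrom d b :: bs.map pvParseBlock

lemma pvSplitBlocks_nil : pvSplitBlocks [] = [[]] := by
  simp [pvSplitBlocks]

lemma pvSplitBlocks_blank (rest : List String) :
    pvSplitBlocks ("" :: rest) = [] :: pvSplitBlocks rest := by
  rw [pvSplitBlocks]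
  simp

lemma pvSplitBlocks_ne_nil (lines : List String) : pvSplitBlocks lines ≠ [] := by
  rw [pvSplitBlocks]; split <;> simp

lemma pvSplitBlocks_cons (line : String) (rest : List String) (h : line ≠ "") :
    pvSplitBlocks (line :: rest) = (pvSplitBlocks rest).modifyHead (line :: ·) := by
  have hb : (line == "") = false := by simpa using h
  by_cases hm : "" ∈ rest
  · have h1 : pvSplitBlocks (line :: rest)
        = (line :: rest).take ((line :: rest).idxOf "") ::
            pvSplitBlocks ((line :: rest).drop ((line :: rest).idxOf "" + 1)) := by
      rw [pvSplitBlocks]; simp [hm]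
    have h2 : pvSplitBlocks rest
        = rest.take (rest.idxOf "") :: pvSplitBlocks (rest.drop (rest.idxOf "" + 1)) := by
      rw [pvSplitBlocks]; simp [hm]
    rw [h1, h2]
    simp [List.idxOf_cons, hb, List.take_succ_cons, List.drop_succ_cons]
  · have h2 : pvSplitBlocks rest = [rest] := by rw [pvSplitBlocks]; simp [hm]
    rw [pvSplitBlocks, h2]
    simp [hm, h, eq_comm]

lemma pvParseBlock_eq (b : List String) : pvParseFrom PySem.Dict.empty b = pvParseBlock b := by
  unfold pvParseFrom pvParseBlock
  congr 1
  funext d line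
  unfold pvInsertLine
  rcases PySem.Str.split? line ": " with _ | (_ | ⟨k, _ | ⟨v, _ | _⟩⟩) <;> simp

lemma pvParseFrom_cons (d : PySem.Dict String String) (line : String) (b : List String) :
    pvParseFrom d (line :: b) = pvParseFrom (pvInsertLine d line) b := rfl

lemma pvG_blank (d : PySem.Dict String String) (rest : List String) :
    pvG d ("" :: rest) = d :: pvG PySem.Dict.empty rest := by
  unfold pvG
  rw [pvSplitBlocks_blank]
  cases h : pvSplitBlocks rest with
  | nil => exact absurd h (pvSplitBlocks_ne_nil _)
  | cons b bs =>
    exact congrArg (fun x => d :: x :: bs.map pvParseBlock) (pvParseBlock_eq b).symm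

lemma pvG_cons (d : PySem.Dict String String) (line : String) (rest : List String)
    (h : line ≠ "") : pvG d (line :: rest) = pvG (pvInsertLine d line) rest := by
  unfold pvG
  rw [pvSplitBlocks_cons line rest h]
  cases hs : pvSplitBlocks rest with
  | nil => rfl
  | cons b bs => simp [pvParseFrom_cons]

-- the loop invariant: finishing A's fold = accumulator ++ B's nonempty block dicts
lemma pv_invariant (lines : List String) (acc : List (PySem.Dict String String))
    (d : PySem.Dict String String) :
    pvFin (lines.foldl pvStepA (acc, d)) =
      acc ++ (pvG d lines).filter (fun d => d.items ≠ []) := by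
  induction lines generalizing acc d with
  | nil =>
    unfold pvG
    rw [pvSplitBlocks_nil]
    simp only [List.foldl_nil, pvFin, pvParseFrom, List.foldl_nil, List.map_nil,
      List.filter_cons, List.filter_nil]
    by_cases h : d.items = [] <;> simp [h]
  | cons line rest ih =>
    by_cases h : line = ""
    · subst h
      rw [List.foldl_cons]
      have hstep : pvStepA (acc, d) "" =
          (if d.items ≠ [] then acc ++ [d] else acc, PySem.Dict.empty) := rfl
      rw [hstep, ih, pvG_blank]
      simp only [List.filter_cons]
      by_cases hd : d.items = [] <;> simp [hd]
    · rw [List.foldl_cons]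
      have hstep : pvStepA (acc, d) line = (acc, pvInsertLine d line) := by
        simp only [pvStepA, pvInsertLine, if_neg h]
        rcases PySem.Str.split? line ": " with _ | (_ | ⟨k, _ | ⟨v, _ | _⟩⟩) <;> rfl
      rw [hstep, ih, pvG_cons d line rest h]

theorem pv_main (text : String) : get_vdisk_list text = get_vdisk_list_alt text := by
  have key : ∀ lines : List String,
      (pvFin (lines.foldl pvStepA ([], PySem.Dict.empty))).map (fun d => d.items) =
      (((pvSplitBlocks lines).map pvParseBlock).filter (fun d => d.items ≠ [])).map
        (fun d => d.items) := by
    intro lines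
    rw [pv_invariant, List.nil_append]
    congr 1
    unfold pvG
    cases hs : pvSplitBlocks lines with
    | nil => exact absurd hs (pvSplitBlocks_ne_nil _)
    | cons b bs => simp [pvParseBlock_eq]
  exact key ((PySem.Str.splitlines text).map (fun l => PySem.Str.strip l))

-- ===== VERDICT (by name: the statement is the Claim_ definition above) =====
theorem get_vdisk_list_spec : Claim_equal_get_vdisk_list := by
  intro text _
  unfold Spec_get_vdisk_list
  exact pv_main text
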